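-- pv_equiv track=rewrite | github.com/danalrds/FP | ddd/functions.py | remove__expenses_type
-- ===== SOURCE A (Python) =====
-- def checktype(expenseslist, tip):               #checks if a certain type of expense is included in the list
--     pos=-1
--     for i in range(0, len(expenseslist)):
--         exp = expenseslist[i]
--         if exp[1] == tip:
--             pos=i
--             break
--     return pos
--
-- def remove__expenses_type(expenseslist,tip):     #removes all expenses of a certain type
--     if checktype(expenseslist,tip)!=-1:
--         pos=checktype(expenseslist,tip)
--         while pos!=-1:
--             expenseslist.pop(pos)
--             pos=checktype(expenseslist,tip)
--         return True
--     else: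
--
--         return False
-- ===== SOURCE B (Python) =====
-- def remove__expenses_type(expenseslist, tip):     # one-pass two-pointer in-place compaction
--     n = len(expenseslist)
--     w = 0
--     for r in range(n):
--         exp = expenseslist[r]
--         if exp[1] != tip:
--             expenseslist[w] = exp
--             w += 1
--     del expenseslist[w:]
--     return w < n
-- ===== Notes on version B (the rewrite author's own statement) =====
-- stated objective: alternative
-- what changed: Replaces the repeated rescan-from-start (checktype) + pop-at-index while loop with a single pass that compacts kept rows to a write cursor, truncates the tail and returns write < original length; trades the match-and-pop loop for a one-pass counter/compaction.
-- outside the precondition, e.g. on remove__expenses_type([['x']], 'food'): A raises IndexError, B raises IndexError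
import Mathlib
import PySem

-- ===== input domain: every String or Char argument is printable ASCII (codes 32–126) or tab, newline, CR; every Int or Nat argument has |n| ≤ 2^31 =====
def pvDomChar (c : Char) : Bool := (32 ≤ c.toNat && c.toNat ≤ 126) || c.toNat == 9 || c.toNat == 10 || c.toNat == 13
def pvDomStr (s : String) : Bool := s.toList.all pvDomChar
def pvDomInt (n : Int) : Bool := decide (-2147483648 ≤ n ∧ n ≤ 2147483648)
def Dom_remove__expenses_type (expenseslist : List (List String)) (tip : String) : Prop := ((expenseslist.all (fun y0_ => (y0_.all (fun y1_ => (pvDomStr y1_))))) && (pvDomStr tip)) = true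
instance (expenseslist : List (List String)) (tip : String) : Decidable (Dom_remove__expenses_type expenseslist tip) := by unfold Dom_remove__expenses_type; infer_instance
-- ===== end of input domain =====

-- B replaces the rescan-and-pop loop by a single compaction pass; equivalence here is
-- about the RETURN value only (both Pythons leave the list mutated to the same filtered state).

-- ===== PORT A =====
-- checktype: scan indices 0..len-1, return the first i with expenseslist[i][1] == tip, else -1.
-- (exp[1] is read with a default; Pre_ guarantees every row has length ≥ 2, where Python is exact)
def checktypeAux (tip : String) (i : Nat) : List (List String) → Int
  | [] => -1
  | exp :: rest =>
      if PySem.List.pyGetD exp 1 "" == tip then (i : Int) else checktypeAux tip (i + 1) rest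

def checktypePort (expenseslist : List (List String)) (tip : String) : Int :=
  checktypeAux tip 0 expenseslist

-- the while loop: pop at the found position until checktype returns -1 (affects only the list)
def popLoopPort (tip : String) (xs : List (List String)) : List (List String) :=
  let pos := checktypePort xs tip
  if pos = -1 then xs
  else
    match h : PySem.List.pop? xs pos with
    | some r =>
        have : r.2.length < xs.length := by
          have := PySem.List.length_of_pop?_eq_some xs h; omega
        popLoopPort tip r.2
    | none => xs
termination_by xs.length

def remove__expenses_type (expenseslist : List (List String)) (tip : String) : Bool :=
  if checktypePort expenseslist tip ≠ -1 then
    let _ := popLoopPort tip expenseslist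
    true
  else
    false

-- ===== PORT B =====
-- one pass: w counts rows kept (exp[1] != tip); the in-place writes/truncation are mutation only
def remove__expenses_type_alt (expenseslist : List (List String)) (tip : String) : Bool :=
  let n := expenseslist.length
  let w := expenseslist.foldl
    (fun w exp => if PySem.List.pyGetD exp 1 "" != tip then w + 1 else w) 0
  decide (w < n)

-- ===== PRECONDITION & SPEC =====
-- Pre_ excludes exactly the inputs on which Python A raises IndexError: a row with fewer than
-- 2 entries is never popped, so A's final full scan (and B's single scan) reads exp[1] on it.
def Pre_remove__expenses_type (expenseslist : List (List String)) (tip : String) : Prop :=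
  ∀ e ∈ expenseslist, 2 ≤ e.length
instance (expenseslist : List (List String)) (tip : String) : Decidable (Pre_remove__expenses_type expenseslist tip) := by unfold Pre_remove__expenses_type; infer_instance

def pvWitness_remove__expenses_type : List (List String) × String := ([["5", "food"], ["3", "fun"]], "food")

def Spec_remove__expenses_type (expenseslist : List (List String)) (tip : String) (out : Bool) : Prop := out = remove__expenses_type_alt expenseslist tip
instance (expenseslist : List (List String)) (tip : String) (out : Bool) : Decidable (Spec_remove__expenses_type expenseslist tip out) := by unfold Spec_remove__expenses_type; infer_instance

-- ===== CLAIM (what is proved, stated in full; the proofs are below) =====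
def Claim_equal_remove__expenses_type : Prop := ∀ (expenseslist : List (List String)) (tip : String), Dom_remove__expenses_type expenseslist tip → Pre_remove__expenses_type expenseslist tip → Spec_remove__expenses_type expenseslist tip (remove__expenses_type expenseslist tip)

-- ===== LEMMAS AND PROOFS =====

-- B's fold just adds the number of kept rows to the accumulator
lemma foldl_keep_add (tip : String) (xs : List (List String)) (w : Nat) :
    xs.foldl (fun w exp => if PySem.List.pyGetD exp 1 "" != tip then w + 1 else w) w
      = w + xs.countP (fun exp => PySem.List.pyGetD exp 1 "" != tip) := by
  induction xs generalizing w with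
  | nil => simp
  | cons e r ih =>
      simp only [List.foldl_cons, List.countP_cons, ih]
      by_cases h : PySem.List.pyGetD e 1 "" != tip
      · simp only [h, if_true]
        omega
      · simp only [Bool.not_eq_true] at h
        simp [h]

-- checktype returns -1 exactly when every row is kept
lemma checktypeAux_eq_neg_one (tip : String) (xs : List (List String)) (i : Nat) :
    (checktypeAux tip i xs = -1)
      ↔ xs.countP (fun exp => PySem.List.pyGetD exp 1 "" != tip) = xs.length := by
  induction xs generalizing i with
  | nil => simp [checktypeAux]
  | cons e r ih =>
      by_cases h : PySem.List.pyGetD e 1 "" = tip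
      · have hle : r.countP (fun exp => PySem.List.pyGetD exp 1 "" != tip) ≤ r.length :=
          List.countP_le_length
        simp only [checktypeAux, List.countP_cons, List.length_cons, h, BEq.rfl, if_true,
          bne_self_eq_false, Bool.false_eq_true, if_false]
        constructor
        · intro hi; exact absurd hi (by omega)
        · intro hc; omega
      · have hb : (PySem.List.pyGetD e 1 "" != tip) = true := by simp [h]
        have hbeq : (PySem.List.pyGetD e 1 "" == tip) = false := by simp [h]
        simp only [checktypeAux, List.countP_cons, List.length_cons, hbeq,
          Bool.false_eq_true, if_false, hb, if_true, ih]
        omega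

lemma alt_eq (expenseslist : List (List String)) (tip : String) :
    remove__expenses_type_alt expenseslist tip
      = decide (expenseslist.countP (fun exp => PySem.List.pyGetD exp 1 "" != tip)
                  < expenseslist.length) := by
  unfold remove__expenses_type_alt
  rw [foldl_keep_add, Nat.zero_add]

-- ===== VERDICT (by name: the statement is the Claim_ definition above) =====
theorem remove__expenses_type_spec : Claim_equal_remove__expenses_type := by
  intro xs tip _hdom _hpre
  unfold Spec_remove__expenses_type
  rw [alt_eq]
  unfold remove__expenses_type checktypePort
  have hiff := checktypeAux_eq_neg_one tip xs 0
  have hle : xs.countP (fun exp => PySem.List.pyGetD exp 1 "" != tip) ≤ xs.length :=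
    List.countP_le_length
  by_cases h : checktypeAux tip 0 xs = -1
  · have hc := hiff.mp h
    rw [if_neg (not_not.mpr h)]
    have hnl : ¬ (xs.countP (fun exp => PySem.List.pyGetD exp 1 "" != tip) < xs.length) := by
      omega
    simp [hnl]
  · rw [if_pos h]
    have hc : xs.countP (fun exp => PySem.List.pyGetD exp 1 "" != tip) ≠ xs.length :=
      fun hc => h (hiff.mpr hc)
    have hl : xs.countP (fun exp => PySem.List.pyGetD exp 1 "" != tip) < xs.length := by omega
    simp [hl]
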